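-- pv_equiv track=rewrite | github.com/MattHuss91/Loreweave | utils/version.py | is_newer
-- ===== SOURCE A (Python) =====
-- def is_newer(remote: str, local: str) -> bool:
--     # naive semver compare: split by dots and compare numerically
--     def parse(v):
--         return [int(p) if p.isdigit() else 0 for p in v.split(".")]
--     a, b = parse(remote), parse(local)
--     # pad to same length
--     m = max(len(a), len(b))
--     a += [0]*(m-len(a))
--     b += [0]*(m-len(b))
--     return a > b
-- ===== SOURCE B (Python) =====
-- def is_newer(remote: str, local: str) -> bool:
--     # Streaming compare: repeatedly chop the next dot-component off each raw string
--     # (no component lists are built, no padding); exhausted strings yield 0-components.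
--     def chop(s):
--         if s is None:
--             return 0, None
--         head, dot, rest = s.partition(".")
--         value = int(head) if head.isdigit() else 0
--         return value, (rest if dot else None)
--
--     r, l = remote, local
--     while r is not None or l is not None:
--         rv, r = chop(r)
--         lv, l = chop(l)
--         if rv != lv:
--             return rv > lv
--     return False
-- ===== Notes on version B (the rewrite author's own statement) =====
-- stated objective: alternative
-- what changed: A materialises both full integer component lists, pads them with zeros to equal length and compares once with Python's lexicographic list '>'; B never builds any list: it streams over the raw strings, chopping one dot-component at a time off each via str.partition and short-circuiting at the first unequal component value.
import Mathlib
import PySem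

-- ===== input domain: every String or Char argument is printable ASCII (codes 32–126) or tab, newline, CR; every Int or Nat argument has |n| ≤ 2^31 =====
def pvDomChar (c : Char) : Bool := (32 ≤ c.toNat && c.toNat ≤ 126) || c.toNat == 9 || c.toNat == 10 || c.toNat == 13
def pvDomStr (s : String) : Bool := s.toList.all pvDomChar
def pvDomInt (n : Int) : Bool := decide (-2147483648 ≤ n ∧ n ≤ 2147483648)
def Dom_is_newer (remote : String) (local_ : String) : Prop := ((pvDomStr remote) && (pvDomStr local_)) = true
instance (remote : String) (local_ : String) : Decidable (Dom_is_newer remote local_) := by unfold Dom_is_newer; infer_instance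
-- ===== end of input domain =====

-- B replaces A's build-pad-compare (component lists, zero padding, list '>') by a streaming
-- pass that chops one dot-component at a time off the raw strings; same cost, different algorithm.


-- ===== PORT A =====
-- int(p) if p.isdigit() else 0  (isdigit guarantees int() succeeds, so getD 0 is exact)
def pvNum (p : String) : Int :=
  if PySem.Str.strIsdigit p then (PySem.Int.ofStr? p).getD 0 else 0

def pvParse (v : String) : List Int :=
  (((PySem.Str.split? v ".").getD [])).map pvNum

-- Python `a > b` on int lists, ported by hand (exact: lexicographic, longer prefix wins)
def pvListGt : List Int → List Int → Bool
  | [], [] => false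
  | [], _ :: _ => false
  | _ :: _, [] => true
  | a :: as, b :: bs => if a ≠ b then decide (a > b) else pvListGt as bs

def is_newer (remote : String) (local_ : String) : Bool :=
  let a := pvParse remote
  let b := pvParse local_
  let m := max a.length b.length
  let a := a ++ List.replicate (m - a.length) 0
  let b := b ++ List.replicate (m - b.length) 0
  pvListGt a b

-- ===== PORT B =====
-- s.partition(".") for the one-char separator ".", ported by hand (exact: head up to the
-- first '.', and the rest after it — `none` when no '.' occurs, Python's empty dot marker)
def splitDot : List Char → List Char × Option (List Char)
  | [] => ([], none)
  | c :: cs =>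
      if c = '.' then ([], some cs)
      else
        let p := splitDot cs
        (c :: p.1, p.2)

-- int(head) if head.isdigit() else 0
def valB (head : List Char) : Int :=
  if PySem.Chars.strIsdigit head then (PySem.Int.ofChars? head).getD 0 else 0

-- chop(s): value of the first component, and what remains (None when exhausted)
def chopB (s : Option (List Char)) : Int × Option (List Char) :=
  match s with
  | none => (0, none)
  | some cs =>
      let p := splitDot cs
      (valB p.1, p.2)

-- size of the remaining-string state, for termination of the while loop
def msizB : Option (List Char) → Nat
  | none => 0
  | some cs => cs.length + 1

theorem splitDot_rest_lt (cs : List Char) (t : List Char) :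
    (splitDot cs).2 = some t → t.length < cs.length := by
  induction cs with
  | nil => simp [splitDot]
  | cons c cs ih =>
    by_cases h : c = '.'
    · simp only [splitDot, if_pos h, Option.some.injEq]
      rintro rfl; simp
    · simp only [splitDot, if_neg h]
      intro ht
      exact Nat.lt_trans (ih ht) (by simp)

theorem msizB_chopB_some (cs : List Char) : msizB (chopB (some cs)).2 < msizB (some cs) := by
  simp only [chopB]
  cases h : (splitDot cs).2 with
  | none => simp [msizB]
  | some t => have := splitDot_rest_lt cs t h; simp only [msizB]; omega

theorem msizB_chopB (s : Option (List Char)) : msizB (chopB s).2 ≤ msizB s := by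
  cases s with
  | none => simp [chopB]
  | some cs => exact Nat.le_of_lt (msizB_chopB_some cs)

-- the while loop (`while r is not None or l is not None`): r/l are the unconsumed rests
def goB (r l : Option (List Char)) : Bool :=
  if _hdone : r = none ∧ l = none then false
  else
    let cr := chopB r
    let cl := chopB l
    if cr.1 ≠ cl.1 then decide (cr.1 > cl.1) else goB cr.2 cl.2
termination_by msizB r + msizB l
decreasing_by
  cases r with
  | none =>
    cases l with
    | none => exact (_hdone ⟨rfl, rfl⟩).elim
    | some ls => exact Nat.add_lt_add_of_le_of_lt (msizB_chopB none) (msizB_chopB_some ls)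
  | some rs => exact Nat.add_lt_add_of_lt_of_le (msizB_chopB_some rs) (msizB_chopB l)

def is_newer_alt (remote : String) (local_ : String) : Bool :=
  goB (some remote.toList) (some local_.toList)

-- ===== PRECONDITION & SPEC =====
def Spec_is_newer (remote : String) (local_ : String) (out : Bool) : Prop := out = is_newer_alt remote local_
instance (remote : String) (local_ : String) (out : Bool) : Decidable (Spec_is_newer remote local_ out) := by unfold Spec_is_newer; infer_instance

-- ===== CLAIM (what is proved, stated in full; the proofs are below) =====
def Claim_equal_is_newer : Prop := ∀ (remote : String) (local_ : String), Dom_is_newer remote local_ → Spec_is_newer remote local_ (is_newer remote local_)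

-- ===== LEMMAS AND PROOFS =====

-- proof-only: the dot-components of a char list, via splitDot (compsTail: of a loop state)
mutual
def comps (cs : List Char) : List (List Char) :=
  (splitDot cs).1 :: compsTail (splitDot cs).2
termination_by 2 * cs.length + 1
decreasing_by
  cases h : (splitDot cs).2 with
  | none => simp [msizB]
  | some t => have := splitDot_rest_lt cs t h; simp only [msizB]; omega
def compsTail : Option (List Char) → List (List Char)
  | none => []
  | some t => comps t
termination_by o => 2 * msizB o
decreasing_by simp only [msizB]; omega
end

-- PySem's splitOn on the one-char separator '.' agrees with the splitDot recursion
theorem splitOn_go_eq (fuel : Nat) (l cur : List Char) (acc : List (List Char))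
    (hf : l.length < fuel) :
    PySem.Chars.splitOn.go ['.'] fuel l cur acc
      = acc.reverse ++ (cur.reverse ++ (splitDot l).1) :: compsTail (splitDot l).2 := by
  induction fuel generalizing l cur acc with
  | zero => omega
  | succ fuel ih =>
    cases l with
    | nil => simp [PySem.Chars.splitOn.go, splitDot, compsTail]
    | cons c rest =>
      by_cases h : c = '.'
      · subst h
        have hpre : (['.'] : List Char).isPrefixOf ('.' :: rest) = true := by
          simp [List.isPrefixOf]
        rw [PySem.Chars.splitOn.go]
        simp only [hpre, if_pos, List.length_cons, List.length_nil, Nat.zero_add,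
          List.drop_succ_cons, List.drop_zero]
        rw [ih rest [] (cur.reverse :: acc) (by simp only [List.length_cons] at hf; omega)]
        have hs : splitDot ('.' :: rest) = ([], some rest) := by simp [splitDot]
        rw [hs, compsTail, comps]
        simp only [List.reverse_cons, List.reverse_nil, List.nil_append, List.append_nil,
          List.append_assoc, List.singleton_append]
      · have hpre : (['.'] : List Char).isPrefixOf (c :: rest) = false := by
          simp only [List.isPrefixOf, Bool.and_eq_false_iff, beq_eq_false_iff_ne, ne_eq]
          exact Or.inl fun hc => h hc.symm
        rw [PySem.Chars.splitOn.go]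
        simp only [hpre, Bool.false_eq_true, if_false]
        rw [ih rest (c :: cur) acc (by simp only [List.length_cons] at hf; omega)]
        have hs : splitDot (c :: rest) = (c :: (splitDot rest).1, (splitDot rest).2) := by
          simp [splitDot, h]
        rw [hs]
        simp only [List.reverse_cons, List.append_assoc, List.singleton_append]

theorem splitOn_eq_comps (cs : List Char) :
    PySem.Chars.splitOn cs ['.'] = comps cs := by
  rw [PySem.Chars.splitOn, splitOn_go_eq (cs.length + 1) cs [] [] (by omega), comps]
  simp

-- A's component values equal B's valB on the same raw component
theorem pvNum_ofList (h : List Char) : pvNum (String.ofList h) = valB h := by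
  unfold pvNum valB
  simp [PySem.Str.strIsdigit, PySem.Int.ofStr?]

-- proof-only: B's comparison pass at the integer-list level ([] stands for an exhausted side)
def cmpZ : List Int → List Int → Bool
  | [], [] => false
  | [], b :: bs => if (0 : Int) ≠ b then decide ((0 : Int) > b) else cmpZ [] bs
  | a :: as, [] => if a ≠ (0 : Int) then decide (a > (0 : Int)) else cmpZ as []
  | a :: as, b :: bs => if a ≠ b then decide (a > b) else cmpZ as bs

-- the values still to be consumed from a loop state
def valsO : Option (List Char) → List Int
  | none => []
  | some cs => (comps cs).map valB

theorem map_valB_compsTail (o : Option (List Char)) :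
    (compsTail o).map valB = valsO o := by
  cases o with
  | none => simp [compsTail, valsO]
  | some t => simp [compsTail, valsO]

theorem valsO_chop (cs : List Char) :
    valsO (some cs) = (chopB (some cs)).1 :: valsO ((chopB (some cs)).2) := by
  rw [valsO, comps, chopB]
  simp [map_valB_compsTail]

-- one step of B's loop, read off cmpZ
theorem cmpZ_step (r l : Option (List Char)) (h : ¬(r = none ∧ l = none)) :
    cmpZ (valsO r) (valsO l)
      = if (chopB r).1 ≠ (chopB l).1 then decide ((chopB r).1 > (chopB l).1)
        else cmpZ (valsO (chopB r).2) (valsO (chopB l).2) := by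
  cases r with
  | none =>
    cases l with
    | none => exact (h ⟨rfl, rfl⟩).elim
    | some ls =>
      rw [valsO_chop ls]
      simp only [valsO, cmpZ, chopB]
      rfl
  | some rs =>
    cases l with
    | none =>
      rw [valsO_chop rs]
      simp only [valsO, cmpZ, chopB]
      rfl
    | some ls =>
      rw [valsO_chop rs, valsO_chop ls]
      simp only [cmpZ, chopB]
      rfl

theorem goB_eq_cmpZ (r l : Option (List Char)) :
    goB r l = cmpZ (valsO r) (valsO l) := by
  induction r, l using goB.induct with
  | case1 r l hdone =>
    obtain ⟨rfl, rfl⟩ := hdone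
    simp [goB, valsO, cmpZ]
  | case2 r l hdone cr cl hv =>
    rw [goB, dif_neg hdone, if_pos hv, cmpZ_step r l hdone, if_pos hv]
  | case3 r l hdone cr cl hv ih =>
    rw [goB, dif_neg hdone, if_neg hv, cmpZ_step r l hdone, if_neg hv, ih]

-- A's pad-then-lexicographic-> equals the zero-filled pass cmpZ
theorem pvListGt_pad (as bs : List Int) :
    pvListGt (as ++ List.replicate (max as.length bs.length - as.length) 0)
             (bs ++ List.replicate (max as.length bs.length - bs.length) 0)
    = cmpZ as bs := by
  induction as generalizing bs with
  | nil =>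
    induction bs with
    | nil => simp [pvListGt, cmpZ]
    | cons b bs ih =>
      have e1 : max ([] : List Int).length (b :: bs).length - ([] : List Int).length
              = bs.length + 1 := by simp
      have e2 : max ([] : List Int).length (b :: bs).length - (b :: bs).length = 0 := by
        simp
      have e3 : max ([] : List Int).length bs.length - ([] : List Int).length
              = bs.length := by simp
      have e4 : max ([] : List Int).length bs.length - bs.length = 0 := by simp
      rw [e1, e2]
      rw [e3, e4] at ih
      simp only [List.nil_append, List.append_nil, List.replicate_zero, List.replicate_succ, pvListGt, cmpZ] at *
      by_cases h : (0 : Int) = b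
      · subst h; simp [ih]
      · simp [h]
  | cons a as ih =>
    cases bs with
    | nil =>
      have e1 : max (a :: as).length ([] : List Int).length - (a :: as).length = 0 := by
        simp
      have e2 : max (a :: as).length ([] : List Int).length - ([] : List Int).length
              = as.length + 1 := by simp
      have := ih ([] : List Int)
      have e3 : max as.length ([] : List Int).length - as.length = 0 := by simp
      have e4 : max as.length ([] : List Int).length - ([] : List Int).length
              = as.length := by simp
      rw [e3, e4] at this
      rw [e1, e2]
      simp only [List.append_nil, List.nil_append, List.replicate_zero, List.replicate_succ, pvListGt, cmpZ] at *
      by_cases h : a = 0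
      · subst h; simp [this]
      · simp [h]
    | cons b bs =>
      have e1 : max (a :: as).length (b :: bs).length - (a :: as).length
              = max as.length bs.length - as.length := by simp [Nat.succ_max_succ]
      have e2 : max (a :: as).length (b :: bs).length - (b :: bs).length
              = max as.length bs.length - bs.length := by simp [Nat.succ_max_succ]
      rw [e1, e2]
      simp only [List.cons_append, pvListGt, cmpZ]
      by_cases h : a = b
      · subst h; simp [ih bs]
      · simp [h]

-- A's parsed value list IS valsO of the whole string
theorem pvParse_eq_valsO (v : String) : pvParse v = valsO (some v.toList) := by
  unfold pvParse
  rw [PySem.Str.split?, show (".":String).toList = ['.'] from by decide, PySem.Chars.split?]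
  simp only [show (['.'] : List Char).isEmpty = false from rfl, Bool.false_eq_true, if_false,
    Option.map_some, Option.getD_some]
  rw [splitOn_eq_comps, valsO, List.map_map]
  exact List.map_congr_left (fun h _ => pvNum_ofList h)

-- ===== VERDICT (by name: the statement is the Claim_ definition above) =====
theorem is_newer_spec : Claim_equal_is_newer := by
  intro remote local_ _
  unfold Spec_is_newer is_newer is_newer_alt
  rw [goB_eq_cmpZ, pvParse_eq_valsO, pvParse_eq_valsO]
  exact pvListGt_pad _ _
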